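-- pv_equiv track=rewrite | github.com/doyencoder/StudyBuddy | Backend/app/services/flashcards_service.py | estimate_flashcard_count
-- ===== SOURCE A (Python) =====
-- from typing import Any, Dict, List
--
-- def _extract_text_messages(messages: List[Dict[str, Any]]) -> List[Dict[str, str]]:
--     cleaned: List[Dict[str, str]] = []
--     for message in messages:
--         role = str(message.get("role", "")).strip().lower()
--         raw = str(message.get("content", "") or "").strip()
--         if not raw:
--             continue
--
--         # Skip structured assistant payloads such as quiz/diagram cards.
--         if raw.startswith('{"__type":'):
--             continue
--
--         cleaned.append({"role": role or "assistant", "content": raw})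
--     return cleaned
--
-- def estimate_flashcard_count(messages: List[Dict[str, Any]]) -> int:
--     """
--     Scales deck size with chat length using the user-approved thresholds:
--       very short -> 2
--       short-medium -> 4
--       medium -> 6
--       long -> 7
--       hard cap -> 10
--     """
--     cleaned = _extract_text_messages(messages)
--     total_chars = sum(len(message["content"]) for message in cleaned)
--     total_messages = len(cleaned)
--     signal = total_chars + (total_messages * 120)
--
--     if signal < 700:
--         return 2
--     if signal < 2200:
--         return 4
--     if signal < 5000:
--         return 6
--     if signal < 8500:
--         return 7
--     return 10
-- ===== SOURCE B (Python) =====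
-- def estimate_flashcard_count(messages):
--     total_chars = 0
--     total_messages = 0
--     for message in messages:
--         raw = str(message.get("content", "") or "").strip()
--         if raw and not raw.startswith('{"__type":'):
--             total_chars += len(raw)
--             total_messages += 1
--     sig = total_chars + total_messages * 120
--     thresholds = (700, 2200, 5000, 8500)
--     counts = (2, 4, 6, 7, 10)
--     return counts[sum(sig >= t for t in thresholds)]
-- ===== Notes on version B (the rewrite author's own statement) =====
-- stated objective: simpler
-- what changed: Single fused pass accumulating total_chars/total_messages directly (no intermediate cleaned list of dicts), and the if-cascade replaced by indexing a counts table with the number of thresholds the signal reaches.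
import Mathlib
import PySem

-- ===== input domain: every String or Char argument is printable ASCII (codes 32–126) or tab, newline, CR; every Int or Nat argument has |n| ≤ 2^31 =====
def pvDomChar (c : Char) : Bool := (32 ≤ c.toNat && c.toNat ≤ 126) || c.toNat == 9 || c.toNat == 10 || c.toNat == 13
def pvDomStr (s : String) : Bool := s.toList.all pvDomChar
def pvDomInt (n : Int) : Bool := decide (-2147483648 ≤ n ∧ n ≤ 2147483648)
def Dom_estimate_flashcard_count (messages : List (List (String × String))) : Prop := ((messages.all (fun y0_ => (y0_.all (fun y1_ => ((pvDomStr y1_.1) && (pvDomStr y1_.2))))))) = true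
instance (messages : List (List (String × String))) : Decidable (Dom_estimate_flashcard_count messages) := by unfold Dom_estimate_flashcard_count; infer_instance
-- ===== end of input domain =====

-- ===== PORT A =====
-- B fuses the extraction into one accumulating pass and replaces the if-cascade by a
-- counts-table lookup indexed by the number of thresholds reached (objective: simpler).
-- A's helper _extract_text_messages; a dict {"role": r, "content": c} is the pair (r, c).
-- `str(message.get("content","") or "")`: the value is a str, so `or ""` maps "" to "" and
-- str(·) is the identity; ported as the if-then-else below (exact on str-valued dicts).
def pv_extract_text_messages (messages : List (List (String × String))) : List (String × String) :=
  messages.foldl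
    (fun cleaned message =>
      let role := PySem.Str.lower (PySem.Str.strip ((PySem.Dict.mk message).getD "role" ""))
      let v := (PySem.Dict.mk message).getD "content" ""
      let raw := PySem.Str.strip (if v = "" then "" else v)
      if raw = "" then cleaned
      else if PySem.Str.startswith raw "{\"__type\":" then cleaned
      else cleaned ++ [((if role = "" then "assistant" else role), raw)])
    []

def estimate_flashcard_count (messages : List (List (String × String))) : Int :=
  let cleaned := pv_extract_text_messages messages
  let total_chars : Int := (cleaned.map (fun message => PySem.Str.len message.2)).sum
  let total_messages : Int := PySem.List.len cleaned
  let signal := total_chars + total_messages * 120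
  if signal < 700 then 2
  else if signal < 2200 then 4
  else if signal < 5000 then 6
  else if signal < 8500 then 7
  else 10

-- ===== PORT B =====
def estimate_flashcard_count_alt (messages : List (List (String × String))) : Int :=
  let st : Int × Int := messages.foldl
    (fun (acc : Int × Int) message =>
      let raw := PySem.Str.strip ((PySem.Dict.mk message).getD "content" "")
      if raw ≠ "" ∧ ¬ (PySem.Str.startswith raw "{\"__type\":" = true)
      then (acc.1 + PySem.Str.len raw, acc.2 + 1)
      else acc)
    (0, 0)
  let signal := st.1 + st.2 * 120
  let thresholds : List Int := [700, 2200, 5000, 8500]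
  let counts : List Int := [2, 4, 6, 7, 10]
  PySem.List.pyGetD counts ((thresholds.countP (fun t => signal ≥ t) : Nat) : Int) 0

-- ===== PRECONDITION & SPEC =====
def Spec_estimate_flashcard_count (messages : List (List (String × String))) (out : Int) : Prop := out = estimate_flashcard_count_alt messages
instance (messages : List (List (String × String))) (out : Int) : Decidable (Spec_estimate_flashcard_count messages out) := by unfold Spec_estimate_flashcard_count; infer_instance

-- ===== CLAIM (what is proved, stated in full; the proofs are below) =====
def Claim_equal_estimate_flashcard_count : Prop := ∀ (messages : List (List (String × String))), Dom_estimate_flashcard_count messages → Spec_estimate_flashcard_count messages (estimate_flashcard_count messages)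

-- ===== LEMMAS AND PROOFS =====

-- Proof-side names for the two loop bodies (definitionally the lambdas inside the ports).
def pvStepA (cleaned : List (String × String)) (message : List (String × String)) :
    List (String × String) :=
  let role := PySem.Str.lower (PySem.Str.strip ((PySem.Dict.mk message).getD "role" ""))
  let v := (PySem.Dict.mk message).getD "content" ""
  let raw := PySem.Str.strip (if v = "" then "" else v)
  if raw = "" then cleaned
  else if PySem.Str.startswith raw "{\"__type\":" then cleaned
  else cleaned ++ [((if role = "" then "assistant" else role), raw)]

def pvStepB (acc : Int × Int) (message : List (String × String)) : Int × Int :=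
  let raw := PySem.Str.strip ((PySem.Dict.mk message).getD "content" "")
  if raw ≠ "" ∧ ¬ (PySem.Str.startswith raw "{\"__type\":" = true)
  then (acc.1 + PySem.Str.len raw, acc.2 + 1)
  else acc

lemma pv_extract_eq (messages : List (List (String × String))) :
    pv_extract_text_messages messages = messages.foldl pvStepA [] := rfl

lemma pv_if_or (v : String) : (if v = "" then "" else v) = v := by
  by_cases h : v = "" <;> simp [h]

lemma pv_extract_append (msgs : List (List (String × String)))
    (cl : List (String × String)) :
    msgs.foldl pvStepA cl = cl ++ msgs.foldl pvStepA [] := by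
  induction msgs generalizing cl with
  | nil => simp
  | cons m ms ih =>
    have hstep : ∀ c, pvStepA c m = c ++ pvStepA [] m := by
      intro c
      simp only [pvStepA, pv_if_or]
      by_cases h1 : PySem.Str.strip ((PySem.Dict.mk m).getD "content" "") = ""
      · rw [if_pos h1, if_pos h1]; simp
      · by_cases h2 : PySem.Str.startswith
            (PySem.Str.strip ((PySem.Dict.mk m).getD "content" ""))
            "{\"__type\":" = true
        · rw [if_neg h1, if_neg h1, if_pos h2, if_pos h2]; simp
        · rw [if_neg h1, if_neg h1, if_neg h2, if_neg h2]; simp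
    simp only [List.foldl_cons]
    rw [ih (pvStepA cl m), ih (pvStepA [] m), hstep cl]
    simp

lemma pv_loop (msgs : List (List (String × String))) (a b : Int) :
    msgs.foldl pvStepB (a, b) =
      (a + ((msgs.foldl pvStepA []).map (fun m => PySem.Str.len m.2)).sum,
       b + (msgs.foldl pvStepA []).length) := by
  induction msgs generalizing a b with
  | nil => simp
  | cons m ms ih =>
    simp only [List.foldl_cons]
    rw [pv_extract_append ms (pvStepA [] m)]
    by_cases hr : PySem.Str.strip ((PySem.Dict.mk m).getD "content" "") = ""
    · have hA : pvStepA [] m = [] := by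
        simp only [pvStepA, pv_if_or]
        rw [if_pos hr]
      have hB : pvStepB (a, b) m = (a, b) := by
        simp only [pvStepB]
        rw [if_neg (fun h => h.1 hr)]
      rw [hA, hB, ih]
      simp
    · by_cases hs :
        PySem.Str.startswith (PySem.Str.strip ((PySem.Dict.mk m).getD "content" ""))
          "{\"__type\":" = true
      · have hA : pvStepA [] m = [] := by
          simp only [pvStepA, pv_if_or]
          rw [if_neg hr, if_pos hs]
        have hB : pvStepB (a, b) m = (a, b) := by
          simp only [pvStepB]
          rw [if_neg (fun h => h.2 hs)]
        rw [hA, hB, ih]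
        simp
      · have hA : pvStepA [] m =
            [((if PySem.Str.lower (PySem.Str.strip ((PySem.Dict.mk m).getD "role" "")) = ""
               then "assistant"
               else PySem.Str.lower (PySem.Str.strip ((PySem.Dict.mk m).getD "role" ""))),
              PySem.Str.strip ((PySem.Dict.mk m).getD "content" ""))] := by
          simp only [pvStepA, pv_if_or]
          rw [if_neg hr, if_neg hs]
          simp
        have hB : pvStepB (a, b) m =
            (a + PySem.Str.len (PySem.Str.strip ((PySem.Dict.mk m).getD "content" "")),
             b + 1) := by
          simp only [pvStepB]
          rw [if_pos ⟨hr, hs⟩]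
        rw [hA, hB, ih]
        simp only [List.map_append, List.map_cons, List.map_nil, List.sum_append,
          List.sum_cons, List.sum_nil, List.length_append, List.length_cons,
          List.length_nil, Prod.mk.injEq]
        constructor <;> push_cast <;> ring

lemma pv_table (s : Int) :
    (if s < 700 then (2 : Int)
     else if s < 2200 then 4
     else if s < 5000 then 6
     else if s < 8500 then 7
     else 10) =
    PySem.List.pyGetD [(2 : Int), 4, 6, 7, 10]
      ((([700, 2200, 5000, 8500] : List Int).countP (fun t => s ≥ t) : Nat) : Int) 0 := by
  by_cases h1 : (700 : Int) ≤ s <;> by_cases h2 : (2200 : Int) ≤ s <;>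
    by_cases h3 : (5000 : Int) ≤ s <;> by_cases h4 : (8500 : Int) ≤ s <;>
    simp only [List.countP, List.countP.go, ge_iff_le, h1, h2, h3, h4, decide_true,
      decide_false, cond_true, cond_false] <;>
    simp [PySem.List.pyGetD, PySem.List.pyGet?, PySem.List.pyIdx?] <;>
    split_ifs <;> omega

-- ===== VERDICT (by name: the statement is the Claim_ definition above) =====
theorem estimate_flashcard_count_spec : Claim_equal_estimate_flashcard_count := by
  intro messages _
  unfold Spec_estimate_flashcard_count estimate_flashcard_count estimate_flashcard_count_alt
  rw [pv_extract_eq]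
  have hloop := pv_loop messages 0 0
  simp only [show (fun (acc : Int × Int) message =>
      let raw := PySem.Str.strip ((PySem.Dict.mk message).getD "content" "")
      if raw ≠ "" ∧ ¬ (PySem.Str.startswith raw "{\"__type\":" = true)
      then (acc.1 + PySem.Str.len raw, acc.2 + 1)
      else acc) = pvStepB from rfl]
  rw [hloop]
  simp only [zero_add, PySem.List.len_eq]
  exact pv_table _
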